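-- pv_equiv track=rewrite | github.com/Rut092/DSA-SHEET-CHALLENGE | 2089-find-target-indices-after-sorting-array/2089-find-target-indices-after-sorting-array.py | targetIndices
-- ===== SOURCE A (Python) =====
-- from typing import List
--
-- def targetIndices(nums: List[int], target: int) -> List[int]:
--     smaller = equal = 0
--     ans = []
--     for num in nums:
--         if num==target:
--             equal+=1
--         elif num<target:
--             smaller+=1
--     for i in range(smaller,smaller+equal):
--         ans.append(i)
--
--     return ans
-- ===== SOURCE B (Python) =====
-- def targetIndices(nums, target):
--     return [i for i, v in enumerate(sorted(nums)) if v == target]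
-- ===== Notes on version B (the rewrite author's own statement) =====
-- stated objective: simpler
-- what changed: Replaces the two-counter pass plus range-building loop with a one-line sort-then-scan: enumerate sorted(nums) and collect indices whose value equals target.
import Mathlib
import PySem

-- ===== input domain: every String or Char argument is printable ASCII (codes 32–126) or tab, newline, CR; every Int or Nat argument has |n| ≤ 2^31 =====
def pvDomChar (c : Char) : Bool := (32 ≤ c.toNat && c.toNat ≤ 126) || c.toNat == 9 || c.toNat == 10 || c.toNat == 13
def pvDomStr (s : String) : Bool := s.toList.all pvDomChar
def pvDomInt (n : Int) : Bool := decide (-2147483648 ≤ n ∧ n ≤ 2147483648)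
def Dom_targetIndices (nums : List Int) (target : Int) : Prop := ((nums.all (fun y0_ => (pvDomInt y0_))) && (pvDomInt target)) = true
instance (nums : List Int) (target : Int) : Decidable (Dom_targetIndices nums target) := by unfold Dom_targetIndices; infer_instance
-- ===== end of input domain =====

-- B replaces A's two-counter pass + range-building loop by the simpler sort-then-scan comprehension; objective: simpler.


-- ===== PORT A =====
def targetIndices (nums : List Int) (target : Int) : List Int :=
  let se : Int × Int := nums.foldl
    (fun (p : Int × Int) num =>
      if num = target then (p.1, p.2 + 1)
      else if num < target then (p.1 + 1, p.2)
      else p) (0, 0)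
  (PySem.List.pyRange se.1 (se.1 + se.2) 1).foldl (fun ans i => ans ++ [i]) []

-- ===== PORT B =====
def targetIndices_alt (nums : List Int) (target : Int) : List Int :=
  ((PySem.List.enumerate (PySem.List.sorted nums (fun x => x) false) 0).filter
      (fun p => p.2 = target)).map (·.1)

-- ===== PRECONDITION & SPEC =====
def Spec_targetIndices (nums : List Int) (target : Int) (out : List Int) : Prop := out = targetIndices_alt nums target
instance (nums : List Int) (target : Int) (out : List Int) : Decidable (Spec_targetIndices nums target out) := by unfold Spec_targetIndices; infer_instance

-- ===== CLAIM (what is proved, stated in full; the proofs are below) =====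
def Claim_equal_targetIndices : Prop := ∀ (nums : List Int) (target : Int), Dom_targetIndices nums target → Spec_targetIndices nums target (targetIndices nums target)

-- ===== LEMMAS AND PROOFS =====

-- A's counting loop computes (smaller, equal) = (countP (< t), count t).
theorem fold_counts (t : Int) (nums : List Int) (a e : Int) :
    nums.foldl (fun (p : Int × Int) num =>
      if num = t then (p.1, p.2 + 1)
      else if num < t then (p.1 + 1, p.2)
      else p) (a, e)
      = (a + (nums.countP (fun y => y < t) : Int), e + (nums.count t : Int)) := by
  induction nums generalizing a e with
  | nil => simp
  | cons x xs ih =>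
    by_cases hx : x = t
    · subst hx
      simp [List.foldl_cons, ih]
      omega
    · by_cases hlt : x < t
      · simp [List.foldl_cons, hx, hlt, ih]
        ring
      · simp [List.foldl_cons, hx, hlt, ih]

theorem foldl_append_id (xs acc : List Int) :
    xs.foldl (fun ans i => ans ++ [i]) acc = acc ++ xs := by
  induction xs generalizing acc with
  | nil => simp
  | cons x xs ih => simp [List.foldl_cons, ih]

-- On a sorted list, the indices whose value equals t form exactly the range
-- [i + countP (< t), i + countP (< t) + count t).
theorem scan_sorted (t : Int) (s : List Int) (hs : s.Pairwise (· ≤ ·)) (i : Int) :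
    ((PySem.List.enumerate s i).filter (fun p => p.2 = t)).map (·.1)
      = PySem.List.pyRange (i + (s.countP (fun y => y < t) : Int))
          (i + (s.countP (fun y => y < t) : Int) + (s.count t : Int)) 1 := by
  induction s generalizing i with
  | nil => simp [PySem.List.enumerate_nil, PySem.List.pyRange_one_eq_nil]
  | cons x xs ih =>
    have hall : ∀ y ∈ xs, x ≤ y := (List.pairwise_cons.mp hs).1
    have hxs : xs.Pairwise (· ≤ ·) := (List.pairwise_cons.mp hs).2
    rw [PySem.List.enumerate_cons]
    by_cases hx : x = t
    · subst hx
      have hc0 : xs.countP (fun y => y < x) = 0 := by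
        rw [List.countP_eq_zero]
        intro y hy
        simpa using not_lt.mpr (hall y hy)
      have hx0 : ¬ (x < x) := lt_irrefl x
      simp [hc0, List.map_cons, ih hxs (i + 1)]
      conv_rhs => rw [PySem.List.pyRange_one_cons (by omega)]
      ring_nf
    · by_cases hlt : x < t
      · simp only [List.filter_cons, List.count_cons, List.countP_cons]
        simp [hx, hlt, ih hxs (i + 1)]
        ring_nf
      · have htx : t < x := lt_of_le_of_ne (not_lt.mp hlt) (Ne.symm hx)
        have hc0 : xs.countP (fun y => y < t) = 0 := by
          rw [List.countP_eq_zero]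
          intro y hy
          simpa using not_lt.mpr (le_of_lt (lt_of_lt_of_le htx (hall y hy)))
        have hn0 : xs.count t = 0 := by
          rw [List.count_eq_zero]
          intro hmem
          exact absurd (hall t hmem) (not_le.mpr htx)
        simp only [List.filter_cons, List.count_cons, List.countP_cons]
        simp [hx, hlt, hc0, hn0, ih hxs (i + 1)]

-- ===== VERDICT (by name: the statement is the Claim_ definition above) =====
theorem targetIndices_spec : Claim_equal_targetIndices := by
  intro nums target _
  unfold Spec_targetIndices targetIndices targetIndices_alt
  rw [fold_counts, foldl_append_id]
  have hperm := PySem.List.sorted_perm nums (fun x => x) false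
  rw [scan_sorted target _ (by simpa using PySem.List.sorted_pairwise nums (fun x => x)) 0,
      hperm.countP_eq, hperm.count_eq]
  simp
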